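-- pv_equiv track=rewrite | github.com/daniel-reich/ubiquitous-fiesta | NJw4mENpSaMz3eqh2_24.py | is_undulating
-- ===== SOURCE A (Python) =====
-- def is_undulating(n):
--     if len(str(n)) < 3:
--         return False
--     else:
--         digits = []
--         for numbers in str(n):
--             if numbers not in digits:
--                 digits.append(numbers)
--         if len(digits) != 2:
--             return False
--         else:
--             stringer = str(n)
--             for i in range(len(stringer) - 1):
--                 if stringer[i] == stringer[i + 1]:
--                     return False
--                 else:
--                     continue
--             return True
-- ===== SOURCE B (Python) =====
-- def is_undulating(n):
--     s = str(n)
--     if len(s) < 3: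
--         return False
--     a, b = s[0], s[1]
--     if a == b:
--         return False
--     # single walk: each char must equal the expected anchor, which flips every step
--     want, nxt = a, b
--     for c in s:
--         if c != want:
--             return False
--         want, nxt = nxt, want
--     return True
-- ===== Notes on version B (the rewrite author's own statement) =====
-- stated objective: simpler
-- what changed: B replaces A's two passes (build a distinct-character list, then a separate adjacent-equality index scan) with a single walk comparing each character of str(n) against a pair of anchor characters that swap every step.
import Mathlib
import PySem

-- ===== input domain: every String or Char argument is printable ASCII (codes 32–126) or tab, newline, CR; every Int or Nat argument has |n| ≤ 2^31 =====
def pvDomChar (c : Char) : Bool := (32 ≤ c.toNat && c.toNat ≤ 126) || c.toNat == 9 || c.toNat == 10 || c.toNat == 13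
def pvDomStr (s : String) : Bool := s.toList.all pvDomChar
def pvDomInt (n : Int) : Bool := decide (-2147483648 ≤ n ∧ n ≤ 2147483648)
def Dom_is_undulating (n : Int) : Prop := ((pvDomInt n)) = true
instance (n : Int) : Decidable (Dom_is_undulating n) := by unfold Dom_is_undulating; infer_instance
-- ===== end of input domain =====

-- B replaces A's two passes (distinct-character list + separate adjacency scan) with one
-- walk against two swapping anchor characters; objective: simpler.

-- ===== PORT A =====
-- port of A's index loop 'for i in range(len(stringer)-1): if stringer[i] == stringer[i+1]: return False'
def pvScanA : List Char → Bool
  | c :: d :: r => if c == d then false else pvScanA (d :: r)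
  | _ => true

def is_undulating (n : Int) : Bool :=
  let s := PySem.Int.toChars n          -- str(n)
  if s.length < 3 then false
  else
    -- for numbers in str(n): if numbers not in digits: digits.append(numbers)
    let digits := s.foldl (fun d c => if d.contains c then d else d ++ [c]) ([] : List Char)
    if digits.length ≠ 2 then false
    else pvScanA s

-- ===== PORT B =====
-- port of Source B's 'for c in s: if c != want: return False; want, nxt = nxt, want'
def pvAltWalk : Char → Char → List Char → Bool
  | _, _, [] => true
  | want, nxt, c :: r => if c ≠ want then false else pvAltWalk nxt want r

def is_undulating_alt (n : Int) : Bool :=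
  let s := PySem.Int.toChars n          -- str(n)
  match s with
  | a :: b :: c :: r => if a == b then false else pvAltWalk a b (a :: b :: c :: r)
  | _ => false                          -- len(s) < 3

-- ===== PRECONDITION & SPEC =====
def Spec_is_undulating (n : Int) (out : Bool) : Prop := out = is_undulating_alt n
instance (n : Int) (out : Bool) : Decidable (Spec_is_undulating n out) := by unfold Spec_is_undulating; infer_instance

-- ===== CLAIM (what is proved, stated in full; the proofs are below) =====
def Claim_equal_is_undulating : Prop := ∀ (n : Int), Dom_is_undulating n → Spec_is_undulating n (is_undulating n)

-- ===== LEMMAS AND PROOFS =====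

-- A's dedup fold only appends: the accumulator is a prefix of the result.
lemma pvDedup_prefix (s : List Char) : ∀ acc : List Char,
    ∃ e, s.foldl (fun d c => if d.contains c then d else d ++ [c]) acc = acc ++ e := by
  induction s with
  | nil => intro acc; exact ⟨[], by simp⟩
  | cons c t ih =>
    intro acc
    simp only [List.foldl]
    by_cases h : acc.contains c
    · simp only [h]
      exact ih acc
    · simp only [h]
      obtain ⟨e, he⟩ := ih (acc ++ [c])
      exact ⟨[c] ++ e, by simpa using he⟩

-- every element of s ends up in the dedup result
lemma pvDedup_mem (s : List Char) : ∀ (acc : List Char) (c : Char), c ∈ s →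
    c ∈ s.foldl (fun d c => if d.contains c then d else d ++ [c]) acc := by
  induction s with
  | nil => intro _ _ h; cases h
  | cons a t ih =>
    intro acc c hc
    simp only [List.foldl]
    rcases List.mem_cons.mp hc with h | h
    · subst h
      by_cases ha : acc.contains c
      · obtain ⟨e, he⟩ := pvDedup_prefix t acc
        rw [if_pos ha, he]
        exact List.mem_append.mpr (Or.inl (List.contains_iff_mem.mp ha))
      · obtain ⟨e, he⟩ := pvDedup_prefix t (acc ++ [c])
        rw [if_neg ha, he]
        simp
    · by_cases ha : acc.contains a
      · rw [if_pos ha]; exact ih acc c h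
      · rw [if_neg ha]; exact ih (acc ++ [a]) c h

-- if everything in s is already in acc, the dedup fold leaves acc unchanged
lemma pvDedup_closed (s : List Char) : ∀ acc : List Char, (∀ c ∈ s, c ∈ acc) →
    s.foldl (fun d c => if d.contains c then d else d ++ [c]) acc = acc := by
  induction s with
  | nil => intro _ _; rfl
  | cons a t ih =>
    intro acc h
    simp only [List.foldl]
    have ha : acc.contains a := List.contains_iff_mem.mpr (h a (by simp))
    rw [if_pos ha]
    exact ih acc (fun c hc => h c (by simp [hc]))

-- if the alternating walk succeeds, every character is one of the two anchors
lemma pvAltWalk_mem : ∀ (t : List Char) (x y : Char), pvAltWalk x y t = true →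
    ∀ c ∈ t, c = x ∨ c = y := by
  intro t
  induction t with
  | nil => intro _ _ _ c hc; cases hc
  | cons a r ih =>
    intro x y h c hc
    by_cases hax : a = x
    · subst hax
      have h' : pvAltWalk y a r = true := by simpa [pvAltWalk] using h
      rcases List.mem_cons.mp hc with h1 | h1
      · exact Or.inl h1
      · rcases ih y a h' c h1 with hm | hm
        · exact Or.inr hm
        · exact Or.inl hm
    · exfalso; simp [pvAltWalk, hax] at h

-- on a list whose characters all lie in {x, y} with x ≠ y, A's adjacency scan and B's walk agree
lemma pvScan_eq_altWalk : ∀ (t : List Char) (x y : Char), x ≠ y →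
    (∀ c ∈ t, c = x ∨ c = y) → pvScanA (x :: t) = pvAltWalk x y (x :: t) := by
  intro t
  induction t with
  | nil =>
    intro x y _ _
    simp [pvScanA, pvAltWalk]
  | cons c r ih =>
    intro x y hxy hmem
    rcases hmem c (by simp) with hc | hc
    · subst hc
      simp [pvScanA, pvAltWalk, hxy]
    · subst hc
      have hr : ∀ d ∈ r, d = c ∨ d = x := by
        intro d hd
        rcases hmem d (by simp [hd]) with h | h
        · exact Or.inr h
        · exact Or.inl h
      have := ih c x (fun h => hxy h.symm) hr
      have hx : ¬ (x = c) := hxy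
      simp only [pvScanA, pvAltWalk, ne_eq, not_true_eq_false, if_false, beq_iff_eq,
        hx] at this ⊢
      simpa [pvScanA, pvAltWalk, hx] using this

-- main list-level fact: A's body equals B's body on any character list
lemma pvMain (s : List Char) :
    (if s.length < 3 then false
     else
       let digits := s.foldl (fun d c => if d.contains c then d else d ++ [c]) ([] : List Char)
       if digits.length ≠ 2 then false else pvScanA s)
    = (match s with
       | a :: b :: c :: r => if a == b then false else pvAltWalk a b (a :: b :: c :: r)
       | _ => false) := by
  match s with
  | [] => simp
  | [a] => simp
  | [a, b] => simp
  | a :: b :: c :: r =>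
    simp only [List.length_cons]
    have hlen : ¬ (r.length + 1 + 1 + 1 < 3) := by omega
    rw [if_neg hlen]
    by_cases hab : a = b
    · subst hab
      -- A's scan fails immediately on a::a::…; A returns false in either branch
      have hscan : pvScanA (a :: a :: c :: r) = false := by simp [pvScanA]
      simp only [beq_self_eq_true, if_pos, hscan]
      split <;> rfl
    · have hab' : (a == b) = false := by simp [hab]
      rw [hab']
      simp only [Bool.false_eq_true, if_false]
      -- first two dedup steps: [] → [a] → [a, b]
      have hstep : (a :: b :: c :: r).foldl
          (fun d c => if d.contains c then d else d ++ [c]) ([] : List Char)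
          = (c :: r).foldl (fun d c => if d.contains c then d else d ++ [c]) [a, b] := by
        simp [List.foldl, Ne.symm hab]
      by_cases hall : ∀ d ∈ c :: r, d = a ∨ d = b
      · -- all chars are anchors: dedup is exactly [a,b], both sides reduce to the scan
        have hded : (a :: b :: c :: r).foldl
            (fun d c => if d.contains c then d else d ++ [c]) ([] : List Char) = [a, b] := by
          rw [hstep]
          exact pvDedup_closed _ _ (by intro d hd; rcases hall d hd with h | h <;> simp [h])
        rw [hded]
        simp only [List.length_cons, List.length_nil, ne_eq, not_true_eq_false,
          reduceIte]
        have : ∀ d ∈ b :: c :: r, d = a ∨ d = b := by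
          intro d hd
          rcases List.mem_cons.mp hd with h | h
          · exact Or.inr h
          · exact hall d h
        exact pvScan_eq_altWalk (b :: c :: r) a b hab this
      · -- some character is neither anchor: A's dedup has length ≥ 3, B's walk fails
        push Not at hall
        obtain ⟨d, hd, hda, hdb⟩ := hall
        have hmem : d ∈ (c :: r).foldl
            (fun d c => if d.contains c then d else d ++ [c]) [a, b] :=
          pvDedup_mem _ _ _ hd
        obtain ⟨e, he⟩ := pvDedup_prefix (c :: r) [a, b]
        have hde : d ∈ e := by
          rw [he] at hmem
          rcases List.mem_append.mp hmem with h | h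
          · rcases h with h | h | h <;> simp_all
          · exact h
        have hne : e ≠ [] := by intro h; subst h; cases hde
        have hlen2 : ((a :: b :: c :: r).foldl
            (fun d c => if d.contains c then d else d ++ [c]) ([] : List Char)).length ≠ 2 := by
          rw [hstep, he]
          simp only [List.length_append, List.length_cons, List.length_nil]
          have : 0 < e.length := List.length_pos_iff.mpr hne
          omega
        rw [if_pos hlen2]
        -- B side: the walk must fail, else all chars would be anchors
        have hwalk : pvAltWalk a b (a :: b :: c :: r) = false := by
          by_contra h
          have h' : pvAltWalk a b (a :: b :: c :: r) = true := by
            cases hh : pvAltWalk a b (a :: b :: c :: r) <;> simp_all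
          rcases pvAltWalk_mem _ a b h' d (by simp [hd]) with h1 | h1
          · exact hda h1
          · exact hdb h1
        exact hwalk.symm

-- ===== VERDICT (by name: the statement is the Claim_ definition above) =====
theorem is_undulating_spec : Claim_equal_is_undulating := by
  intro n _
  unfold Spec_is_undulating is_undulating is_undulating_alt
  exact pvMain (PySem.Int.toChars n)
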